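-- pv_equiv track=rewrite | github.com/BigBrou/Algorithm | CodingInterviewBook/HashTable/30_lcs_norepeat.py | solution
-- ===== SOURCE A (Python) =====
-- def solution(str):
--     alphabet_dict = dict()
--
--     str_len = len(str)
--     final_sub_length = 0
--
--     for idx in range(str_len):
--         if str[idx] not in alphabet_dict:
--             alphabet_dict[str[idx]] = idx
--         else:
--             sub_length = idx - alphabet_dict[str[idx]]
--             alphabet_dict[str[idx]] = idx
--             if sub_length > final_sub_length:
--                 final_sub_length = sub_length
--
--     return final_sub_length
-- ===== SOURCE B (Python) =====
-- def solution(str):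
--     # Pass 1: group all occurrence indices by character.
--     positions = {}
--     for idx, ch in enumerate(str):
--         positions.setdefault(ch, []).append(idx)
--     # Pass 2: max gap between consecutive occurrences within each group.
--     best = 0
--     for idx_list in positions.values():
--         for prev, cur in zip(idx_list, idx_list[1:]):
--             best = max(best, cur - prev)
--     return best
-- ===== Notes on version B (the rewrite author's own statement) =====
-- stated objective: alternative
-- what changed: Replaces the single last-seen-index scan with a two-pass group-then-scan decomposition: first build a dict mapping each character to the list of all its indices, then take the maximum over consecutive-index differences within each group.
import Mathlib
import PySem

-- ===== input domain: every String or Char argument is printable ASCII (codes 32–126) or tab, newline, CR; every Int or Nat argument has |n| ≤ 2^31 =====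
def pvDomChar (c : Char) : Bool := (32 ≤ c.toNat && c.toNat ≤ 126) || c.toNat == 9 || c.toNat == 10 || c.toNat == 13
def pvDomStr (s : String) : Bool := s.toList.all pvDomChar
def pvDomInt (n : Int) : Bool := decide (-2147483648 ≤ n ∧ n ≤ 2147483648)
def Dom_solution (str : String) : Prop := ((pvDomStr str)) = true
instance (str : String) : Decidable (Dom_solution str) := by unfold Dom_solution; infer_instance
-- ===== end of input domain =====

-- B replaces A's single last-seen-index scan by a two-pass group-then-scan-gaps decomposition (alternative, same cost).

-- ===== PORT A =====
-- loop body of A: one iteration of 'for idx in range(str_len)', given (idx, str[idx])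
def aStep (st : PySem.Dict Char Int × Int) (p : Int × Char) : PySem.Dict Char Int × Int :=
  match st.1.get? p.2 with
  | none => (st.1.insert p.2 p.1, st.2)
  | some j =>
    let sub := p.1 - j
    if sub > st.2 then (st.1.insert p.2 p.1, sub) else (st.1.insert p.2 p.1, st.2)

-- 'for idx in range(str_len): … str[idx] …'; str[idx] is PySem.List.pyGetD with a dummy default,
-- exact since idx is always in range
def solution (str : String) : Int :=
  ((PySem.List.pyRange 0 (PySem.Str.len str) 1).foldl
    (fun st idx => aStep st (idx, PySem.List.pyGetD str.toList idx ' '))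
    (PySem.Dict.empty, 0)).2

-- ===== PORT B =====
-- positions.setdefault(ch, []).append(idx) is exactly d.modify ch [] (· ++ [idx])
def solution_alt (str : String) : Int :=
  let positions : PySem.Dict Char (List Int) :=
    (PySem.List.enumerate str.toList 0).foldl
      (fun d p => d.modify p.2 [] (fun l => l ++ [p.1])) PySem.Dict.empty
  positions.values.foldl
    (fun best l =>
      (l.zip (PySem.List.slice l (some 1) none)).foldl
        (fun best pc => max best (pc.2 - pc.1)) best) 0

-- ===== PRECONDITION & SPEC =====
def Spec_solution (str : String) (out : Int) : Prop := out = solution_alt str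
instance (str : String) (out : Int) : Decidable (Spec_solution str out) := by unfold Spec_solution; infer_instance

-- ===== CLAIM (what is proved, stated in full; the proofs are below) =====
def Claim_equal_solution : Prop := ∀ (str : String), Dom_solution str → Spec_solution str (solution str)

-- ===== LEMMAS AND PROOFS =====

def optTo : Option Int → List Int
  | none => []
  | some j => [j]

def gapList (l : List Int) : List Int := (l.zip l.tail).map (fun p => p.2 - p.1)

-- the head contribution of one A-iteration, as a list
def headGap (o : Option Int) (i : Int) : List Int :=
  match o with
  | none => []
  | some j => [i - j]

def occIdx (c : Char) (ps : List (Int × Char)) : List Int :=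
  (ps.filter (fun p => p.2 == c)).map (·.1)

-- all gaps A's scan ever measures, in scan order, starting from last-seen dict d
def newGaps (d : PySem.Dict Char Int) : List (Int × Char) → List Int
  | [] => []
  | p :: ps => headGap (d.get? p.2) p.1 ++ newGaps (d.insert p.2 p.1) ps

lemma gapList_optTo (o : Option Int) : gapList (optTo o) = [] := by
  cases o <;> rfl

lemma gapList_optTo_cons (o : Option Int) (i : Int) (rest : List Int) :
    gapList (optTo o ++ i :: rest) = headGap o i ++ gapList (i :: rest) := by
  cases o <;> simp [optTo, gapList, headGap]

lemma occIdx_cons (c : Char) (p : Int × Char) (ps : List (Int × Char)) :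
    occIdx c (p :: ps) = if p.2 = c then p.1 :: occIdx c ps else occIdx c ps := by
  simp only [occIdx, List.filter_cons, beq_iff_eq]
  split_ifs <;> simp

lemma aStep_snd (ps : List (Int × Char)) :
    ∀ (d : PySem.Dict Char Int) (best : Int),
      (ps.foldl aStep (d, best)).2 = (newGaps d ps).foldl max best := by
  induction ps with
  | nil => intro d best; rfl
  | cons p ps ih =>
    intro d best
    simp only [List.foldl_cons, newGaps]
    cases h : d.get? p.2 with
    | none => simp only [aStep, h, headGap, List.nil_append]; exact ih _ _
    | some j =>
      simp only [aStep, h, headGap, List.singleton_append, List.foldl_cons]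
      split_ifs with hgt
      · rw [ih]; congr 1; omega
      · rw [ih]; congr 1; omega

lemma newGaps_perm (ps : List (Int × Char)) :
    ∀ (d : PySem.Dict Char Int) (K : List Char), K.Nodup → (∀ p ∈ ps, p.2 ∈ K) →
      (newGaps d ps).Perm
        (K.flatMap fun c => gapList (optTo (d.get? c) ++ occIdx c ps)) := by
  induction ps with
  | nil =>
    intro d K _ _
    simp [newGaps, occIdx, gapList_optTo]
  | cons p ps ih =>
    intro d K hnd hmem
    have hc : p.2 ∈ K := hmem p (by simp)
    obtain ⟨K1, K2, rfl⟩ := List.append_of_mem hc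
    rw [List.nodup_append] at hnd
    obtain ⟨hnd1, hnd2, hdisj⟩ := hnd
    have hK1 : p.2 ∉ K1 := fun hmem1 => (hdisj p.2 hmem1 p.2 (by simp) rfl).elim
    have hK2 : p.2 ∉ K2 := (List.nodup_cons.mp hnd2).1
    have hndK : (K1 ++ p.2 :: K2).Nodup := by
      rw [List.nodup_append]; exact ⟨hnd1, hnd2, hdisj⟩
    -- the two per-character gap functions
    set f : Char → List Int :=
      fun c => gapList (optTo (d.get? c) ++ occIdx c (p :: ps)) with hf
    set g : Char → List Int :=
      fun c => gapList (optTo ((d.insert p.2 p.1).get? c) ++ occIdx c ps) with hg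
    have hfg : ∀ c, c ≠ p.2 → f c = g c := by
      intro c hne
      have h1 : (d.insert p.2 p.1).get? c = d.get? c := by
        simp [PySem.Dict.get?_insert, hne]
      simp only [hf, hg, h1, occIdx_cons]
      rw [if_neg (fun h => hne h.symm)]
    have hocc : occIdx p.2 (p :: ps) = p.1 :: occIdx p.2 ps := by
      rw [occIdx_cons, if_pos rfl]
    have hfc : f p.2 = headGap (d.get? p.2) p.1 ++ g p.2 := by
      simp only [hf, hg, hocc, PySem.Dict.get?_insert_self, optTo, List.singleton_append]
      exact gapList_optTo_cons _ _ _
    have hIH := ih (d.insert p.2 p.1) (K1 ++ p.2 :: K2) hndK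
      (fun q hq => hmem q (by simp [hq]))
    simp only [newGaps]
    have hsplit : ∀ (h : Char → List Int),
        (K1 ++ p.2 :: K2).flatMap h = K1.flatMap h ++ (h p.2 ++ K2.flatMap h) := by
      intro h; simp
    rw [hsplit f, hsplit g] at *
    have hA1 : K1.flatMap f = K1.flatMap g :=
      List.flatMap_congr (fun c hcm => hfg c (fun he => hK1 (he ▸ hcm)))
    have hA2 : K2.flatMap f = K2.flatMap g :=
      List.flatMap_congr (fun c hcm => hfg c (fun he => hK2 (he ▸ hcm)))
    rw [hA1, hA2, hfc]
    -- goal: headGap ++ newGaps ~ K1.flatMap g ++ ((headGap ++ g p.2) ++ K2.flatMap g)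
    refine ((hIH.append_left (headGap (d.get? p.2) p.1)).trans ?_)
    have hcomm := List.perm_append_comm
      (l₁ := headGap (d.get? p.2) p.1) (l₂ := K1.flatMap g)
    simpa [List.append_assoc] using hcomm.append_right (g p.2 ++ K2.flatMap g)

-- ===== VERDICT (by name: the statement is the Claim_ definition above) =====
theorem solution_spec : Claim_equal_solution := by
  intro s _
  unfold Spec_solution
  have hgetD : ∀ c, ((PySem.List.enumerate s.toList 0).foldl
      (fun d p => d.modify p.2 [] (fun l => l ++ [p.1])) PySem.Dict.empty).getD c []
      = occIdx c (PySem.List.enumerate s.toList 0) := by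
    intro c
    have hswap : (PySem.List.enumerate s.toList 0).foldl
        (fun d p => d.modify p.2 [] (fun l => l ++ [p.1])) PySem.Dict.empty
        = ((PySem.List.enumerate s.toList 0).map Prod.swap).foldl
          (fun d p => d.modify p.1 [] (fun l => l ++ [p.2])) PySem.Dict.empty := by
      rw [List.foldl_map]; simp
    rw [hswap, PySem.Dict.getD_foldl_modify_append]
    simp [occIdx, List.filter_map, Function.comp_def]
  have hnd : ((PySem.List.enumerate s.toList 0).foldl
      (fun d p => d.modify p.2 [] (fun l => l ++ [p.1])) PySem.Dict.empty).keys.Nodup :=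
    PySem.Dict.nodup_keys_foldl_modify_key (PySem.List.enumerate s.toList 0)
      (fun p => p.2) [] (fun _ p => (· ++ [p.1])) PySem.Dict.empty
      (by simp [PySem.Dict.keys_empty])
  have hmemK : ∀ p ∈ PySem.List.enumerate s.toList 0,
      p.2 ∈ ((PySem.List.enumerate s.toList 0).foldl
        (fun d p => d.modify p.2 [] (fun l => l ++ [p.1])) PySem.Dict.empty).keys := by
    intro p hp
    rw [PySem.Dict.keys_foldl_modify_key]
    simp only [PySem.Dict.keys_empty, PySem.Set.update_nil_left, PySem.Set.mem_ofList]
    exact List.mem_map_of_mem hp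
  -- A's scan computes the running max of newGaps
  have hA : solution s
      = (newGaps PySem.Dict.empty (PySem.List.enumerate s.toList 0)).foldl max 0 := by
    unfold solution
    rw [show PySem.Str.len s = PySem.List.len s.toList from by
      simp [PySem.Str.len_eq, PySem.List.len]]
    have hmap : (((PySem.List.pyRange 0 (PySem.List.len s.toList) 1).map
        (fun j : Int => (j, PySem.List.pyGetD s.toList j ' '))).foldl aStep
        (PySem.Dict.empty, 0))
        = (PySem.List.pyRange 0 (PySem.List.len s.toList) 1).foldl
          (fun st idx => aStep st (idx, PySem.List.pyGetD s.toList idx ' '))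
          (PySem.Dict.empty, 0) := List.foldl_map
    rw [← hmap, ← PySem.List.enumerate_eq_map_pyRange s.toList ' ']
    exact aStep_snd _ _ _
  -- B's two passes compute the fold of max over the per-character gap lists
  have hB : solution_alt s
      = (((PySem.List.enumerate s.toList 0).foldl
          (fun d p => d.modify p.2 [] (fun l => l ++ [p.1])) PySem.Dict.empty).keys.flatMap
          (fun c => gapList (occIdx c (PySem.List.enumerate s.toList 0)))).foldl max 0 := by
    simp only [solution_alt]
    rw [PySem.Dict.values_eq_map_keys _ hnd [], List.foldl_map]
    have hinner : (fun (best : Int) (c : Char) =>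
        ((((PySem.List.enumerate s.toList 0).foldl
            (fun d p => d.modify p.2 [] (fun l => l ++ [p.1])) PySem.Dict.empty).getD c []).zip
          (PySem.List.slice (((PySem.List.enumerate s.toList 0).foldl
            (fun d p => d.modify p.2 [] (fun l => l ++ [p.1])) PySem.Dict.empty).getD c [])
            (some 1) none)).foldl (fun best pc => max best (pc.2 - pc.1)) best)
        = fun best c => (gapList (occIdx c (PySem.List.enumerate s.toList 0))).foldl max best := by
      funext best c
      rw [hgetD, PySem.List.slice_from_one, gapList, List.foldl_map]
    rw [hinner]
    exact (List.foldl_flatMap).symm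
  rw [hA, hB]
  have hperm := newGaps_perm (PySem.List.enumerate s.toList 0) PySem.Dict.empty _ hnd hmemK
  simp only [PySem.Dict.get?_empty, optTo, List.nil_append] at hperm
  exact hperm.foldl_op_eq
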